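-- pv_equiv track=rewrite | github.com/ellidorikjr/WBAM | app.py | next_objective_from_tasks
-- ===== SOURCE A (Python) =====
-- def next_objective_from_tasks(tasks):
--     # priority: doing > todo > none
--     doing = [t for t in tasks if t["status"] == "doing"]
--     todo = [t for t in tasks if t["status"] == "todo"]
--     if doing:
--         return f"Continue: {doing[0]['title']}"
--     if todo:
--         return f"Start: {todo[0]['title']}"
--     return "No pending tasks. Create the next technical task."
-- ===== SOURCE B (Python) =====
-- def next_objective_from_tasks(tasks):
--     # selection by priority key: rank tasks (doing=0, todo=1, other=2) and take the
--     # first-minimal one with min(); index a prefix table by the winning rank.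
--     if not tasks:
--         return "No pending tasks. Create the next technical task."
--     rank = {"doing": 0, "todo": 1}
--     best = min(tasks, key=lambda t: rank.get(t["status"], 2))
--     r = rank.get(best["status"], 2)
--     if r == 2:
--         return "No pending tasks. Create the next technical task."
--     return ["Continue: ", "Start: "][r] + best["title"]
-- ===== Notes on version B (the rewrite author's own statement) =====
-- stated objective: alternative
-- what changed: B replaces A's two staged status filters with a single min-selection under a numeric priority key (doing=0, todo=1, other=2) and a prefix table indexed by the winning rank.
import Mathlib
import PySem

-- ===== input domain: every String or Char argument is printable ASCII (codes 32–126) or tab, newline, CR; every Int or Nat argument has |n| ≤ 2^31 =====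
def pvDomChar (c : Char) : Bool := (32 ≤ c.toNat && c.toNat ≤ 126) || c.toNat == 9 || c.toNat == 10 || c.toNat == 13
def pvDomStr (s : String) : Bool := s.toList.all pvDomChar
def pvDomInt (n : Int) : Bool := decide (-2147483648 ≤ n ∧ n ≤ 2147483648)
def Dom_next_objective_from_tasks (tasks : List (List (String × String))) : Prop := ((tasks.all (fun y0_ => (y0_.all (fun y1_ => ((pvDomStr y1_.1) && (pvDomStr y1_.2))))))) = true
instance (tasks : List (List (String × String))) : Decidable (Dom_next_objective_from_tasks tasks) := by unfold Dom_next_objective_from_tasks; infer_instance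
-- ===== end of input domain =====

-- B selects by a numeric priority key (doing=0, todo=1, other=2) with a single first-minimal
-- min-selection and a prefix table, instead of A's two staged status filters; same cost.

-- dict[k] on an assoc list: first-match lookup (exact for dicts, which have unique keys)
def pvLookup (t : List (String × String)) (k : String) : Option String :=
  (t.find? (fun p => p.1 == k)).map (·.2)

-- ===== PORT A =====
-- t["status"] / t["title"] ported as lookup with default "" ; Pre_ below excludes exactly the
-- inputs where Python would raise KeyError, so the default is never consulted inside Pre_.
def next_objective_from_tasks (tasks : List (List (String × String))) : String :=
  let doing := tasks.filter (fun t => (pvLookup t "status").getD "" == "doing")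
  let todo := tasks.filter (fun t => (pvLookup t "status").getD "" == "todo")
  match doing.head? with
  | some t => "Continue: " ++ (pvLookup t "title").getD ""
  | none =>
    match todo.head? with
    | some t => "Start: " ++ (pvLookup t "title").getD ""
    | none => "No pending tasks. Create the next technical task."

-- ===== PORT B =====
-- rank.get(t["status"], 2) of Source B: the two-entry table looked up with default 2
def pvRank (t : List (String × String)) : Nat :=
  let s := (pvLookup t "status").getD ""
  if s == "doing" then 0 else if s == "todo" then 1 else 2

-- min(tasks, key=…): left fold keeping the first element of strictly smaller key (Python's
-- first-minimal rule), seeded with the head; then the prefix table indexed by the rank.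
def next_objective_from_tasks_alt (tasks : List (List (String × String))) : String :=
  match tasks with
  | [] => "No pending tasks. Create the next technical task."
  | t0 :: rest =>
    let best := (rest.foldl
      (fun (st : List (String × String) × Nat) t =>
        if pvRank t < st.2 then (t, pvRank t) else st) (t0, pvRank t0)).1
    let r := pvRank best
    if r == 2 then "No pending tasks. Create the next technical task."
    else (if r == 0 then "Continue: " else "Start: ") ++ (pvLookup best "title").getD ""

-- ===== PRECONDITION & SPEC =====
-- Pre_ = exactly the inputs where Python A returns: every task has a "status" key, and the
-- selected task (first "doing", else first "todo") has a "title" key.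
def Pre_next_objective_from_tasks (tasks : List (List (String × String))) : Prop :=
  (tasks.all (fun t => (pvLookup t "status").isSome)) = true ∧
  (((tasks.find? (fun t => (pvLookup t "status").getD "" == "doing")).orElse
      (fun _ => tasks.find? (fun t => (pvLookup t "status").getD "" == "todo"))).all
    (fun t => (pvLookup t "title").isSome)) = true
instance (tasks : List (List (String × String))) : Decidable (Pre_next_objective_from_tasks tasks) := by
  unfold Pre_next_objective_from_tasks; infer_instance

def pvWitness_next_objective_from_tasks : (List (List (String × String))) :=
  [[("status", "todo"), ("title", "Fix bug")], [("status", "doing"), ("title", "Ship it")]]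

def Spec_next_objective_from_tasks (tasks : List (List (String × String))) (out : String) : Prop := out = next_objective_from_tasks_alt tasks
instance (tasks : List (List (String × String))) (out : String) : Decidable (Spec_next_objective_from_tasks tasks out) := by unfold Spec_next_objective_from_tasks; infer_instance

-- ===== CLAIM (what is proved, stated in full; the proofs are below) =====
def Claim_equal_next_objective_from_tasks : Prop := ∀ (tasks : List (List (String × String))), Dom_next_objective_from_tasks tasks → Pre_next_objective_from_tasks tasks → Spec_next_objective_from_tasks tasks (next_objective_from_tasks tasks)

-- ===== LEMMAS AND PROOFS =====

theorem pvRank_le_two (t : List (String × String)) : pvRank t ≤ 2 := by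
  unfold pvRank; dsimp only; split_ifs <;> omega

-- characterisation of B's min-fold by the heads of the rank-0 / rank-1 sublists
theorem pv_minfold (ts : List (List (String × String)))
    (b : List (String × String)) (k : Nat) (hk : k ≤ 2) :
    ts.foldl (fun (st : List (String × String) × Nat) t =>
        if pvRank t < st.2 then (t, pvRank t) else st) (b, k)
    = if k = 0 then (b, k)
      else
        match (ts.filter (fun t => pvRank t == 0)).head? with
        | some t => (t, 0)
        | none =>
          if k = 1 then (b, k)
          else
            match (ts.filter (fun t => pvRank t == 1)).head? with
            | some t => (t, 1)
            | none => (b, k) := by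
  induction ts generalizing b k with
  | nil => simp
  | cons t rest ih =>
    have ht := pvRank_le_two t
    simp only [List.foldl_cons, List.filter_cons]
    generalize hr : pvRank t = r at *
    interval_cases r <;> interval_cases k <;>
      simp [ih _ 0 (by omega), ih _ 1 (by omega), ih _ 2 (by omega)]

theorem pv_head?_filter {a : Type} (p : a -> Bool) (l : List a) (u : a)
    (h : (l.filter p).head? = some u) : p u = true := by
  have hm : u ∈ l.filter p := by
    cases lf : (l.filter p) with
    | nil => rw [lf] at h; simp at h
    | cons x t => rw [lf] at h; simp at h; simp [h]
  exact (List.mem_filter.mp hm).2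

theorem pv_rank_head0 (l : List (List (String × String))) (u : List (String × String))
    (h : (l.filter (fun t => pvRank t == 0)).head? = some u) : pvRank u = 0 := by
  simpa using pv_head?_filter _ _ _ h

theorem pv_rank_head1 (l : List (List (String × String))) (u : List (String × String))
    (h : (l.filter (fun t => pvRank t == 1)).head? = some u) : pvRank u = 1 := by
  simpa using pv_head?_filter _ _ _ h

theorem pv_rank0_iff (t : List (String × String)) :
    (pvRank t == 0) = ((pvLookup t "status").getD "" == "doing") := by
  unfold pvRank; dsimp only; split_ifs with h1 h2 <;> simp [h1]

theorem pv_rank1_iff (t : List (String × String)) :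
    (pvRank t == 1) = ((pvLookup t "status").getD "" == "todo") := by
  unfold pvRank; dsimp only; split_ifs with h1 h2 <;> simp_all

-- ===== VERDICT (by name: the statement is the Claim_ definition above) =====
theorem next_objective_from_tasks_spec : Claim_equal_next_objective_from_tasks := by
  intro tasks _ _
  unfold Spec_next_objective_from_tasks next_objective_from_tasks next_objective_from_tasks_alt
  have ef0 : tasks.filter (fun t => (pvLookup t "status").getD "" == "doing")
      = tasks.filter (fun t => pvRank t == 0) :=
    List.filter_congr (fun t _ => (pv_rank0_iff t).symm)
  have ef1 : tasks.filter (fun t => (pvLookup t "status").getD "" == "todo")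
      = tasks.filter (fun t => pvRank t == 1) :=
    List.filter_congr (fun t _ => (pv_rank1_iff t).symm)
  rw [ef0, ef1]
  cases tasks with
  | nil => simp
  | cons t0 rest =>
    dsimp only
    rw [pv_minfold rest t0 (pvRank t0) (pvRank_le_two t0)]
    simp only [List.filter_cons]
    have ht := pvRank_le_two t0
    generalize hr : pvRank t0 = r at *
    interval_cases r <;>
      cases h0 : (rest.filter (fun t => pvRank t == 0)).head? <;>
      cases h1 : (rest.filter (fun t => pvRank t == 1)).head? <;>
      first
        | (have hu0 := pv_rank_head0 _ _ h0; have hu1 := pv_rank_head1 _ _ h1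
           simp [hr, h0, h1, hu0, hu1])
        | (have hu0 := pv_rank_head0 _ _ h0; simp [hr, h0, h1, hu0])
        | (have hu1 := pv_rank_head1 _ _ h1; simp [hr, h0, h1, hu1])
        | simp [hr, h0, h1]
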